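-- pv_equiv track=rewrite | github.com/etvega/dev_2026_1_workshop1 | src/stats/stats.py | moda
-- ===== SOURCE A (Python) =====
-- def moda(numeros):
--     if len(numeros) == 0:
--         return None
--
--     frecuencias = {}
--
--     for num in numeros:
--         if num in frecuencias:
--             frecuencias[num] += 1
--         else:
--             frecuencias[num] = 1
--
--     max_frecuencia = 0
--     moda = numeros[0]
--
--     for num in frecuencias:
--         if frecuencias[num] > max_frecuencia:
--             max_frecuencia = frecuencias[num]
--             moda = num
--
--     return moda
-- ===== SOURCE B (Python) =====
-- def moda(numeros):
--     if not numeros: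
--         return None
--     best = numeros[0]
--     best_count = 0
--     for num in numeros:
--         c = numeros.count(num)
--         if c > best_count:
--             best = num
--             best_count = c
--     return best
-- ===== Notes on version B (the rewrite author's own statement) =====
-- stated objective: simpler
-- what changed: Replaces the frequency dictionary plus a second pass over its keys by a single loop over the list that rescans with list.count and keeps the strict-max (element, count) pair, reproducing the earliest-first-occurrence tie-break.
import Mathlib
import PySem

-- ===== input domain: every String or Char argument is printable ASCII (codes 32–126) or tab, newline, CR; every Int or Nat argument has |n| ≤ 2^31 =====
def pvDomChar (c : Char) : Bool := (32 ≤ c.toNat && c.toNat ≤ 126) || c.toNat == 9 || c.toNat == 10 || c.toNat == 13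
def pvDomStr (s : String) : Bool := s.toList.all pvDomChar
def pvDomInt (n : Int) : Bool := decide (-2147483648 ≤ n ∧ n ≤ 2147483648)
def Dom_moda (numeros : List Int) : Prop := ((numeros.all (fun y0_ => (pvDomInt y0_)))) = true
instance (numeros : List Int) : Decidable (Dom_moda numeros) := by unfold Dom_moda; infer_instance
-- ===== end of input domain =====

-- B replaces A's frequency dictionary and second key pass by one loop over the list that
-- rescans with list.count and keeps a strict-max (element, count) pair: simpler, same values.

-- ===== PORT A =====
def moda (numeros : List Int) : Option Int :=
  if numeros.length = 0 then none
  else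
    let frecuencias : PySem.Dict Int Int :=
      numeros.foldl (fun d num =>
        if d.contains num then d.modify num 0 (· + 1) else d.insert num 1)
        PySem.Dict.empty
    -- state (max_frecuencia, moda); `for num in frecuencias` iterates the keys
    let r := frecuencias.keys.foldl
      (fun (st : Int × Int) num =>
        if frecuencias.getD num 0 > st.1 then (frecuencias.getD num 0, num) else st)
      (0, PySem.List.pyGetD numeros 0 0)
    some r.2

-- ===== PORT B =====
def moda_alt (numeros : List Int) : Option Int :=
  match numeros with
  | [] => none
  | h :: _ =>
    -- state (best, best_count); c = numeros.count(num)
    let r := numeros.foldl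
      (fun (st : Int × Int) num =>
        if ((PySem.List.count numeros num : Nat) : Int) > st.2
        then (num, ((PySem.List.count numeros num : Nat) : Int)) else st)
      (h, 0)
    some r.1

-- ===== PRECONDITION & SPEC =====
def Spec_moda (numeros : List Int) (out : Option Int) : Prop := out = moda_alt numeros
instance (numeros : List Int) (out : Option Int) : Decidable (Spec_moda numeros out) := by unfold Spec_moda; infer_instance

-- ===== CLAIM (what is proved, stated in full; the proofs are below) =====
def Claim_equal_moda : Prop := ∀ (numeros : List Int), Dom_moda numeros → Spec_moda numeros (moda numeros)

-- ===== LEMMAS AND PROOFS =====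

-- B's loop body, with the count function abstracted
def pvStepB (c : Int → Int) (st : Int × Int) (x : Int) : Int × Int :=
  if c x > st.2 then (x, c x) else st

-- A's loop body (state (max, mode)) is pvStepB with the pair swapped
def pvStepA (c : Int → Int) (st : Int × Int) (x : Int) : Int × Int :=
  if c x > st.1 then (c x, x) else st

theorem pvStepA_swap (c : Int → Int) (l : List Int) (s : Int × Int) :
    l.foldl (pvStepA c) s = Prod.swap (l.foldl (pvStepB c) s.swap) := by
  induction l generalizing s with
  | nil => simp
  | cons x t ih =>
    simp only [List.foldl_cons, ih]
    congr 1
    simp only [pvStepA, pvStepB, Prod.swap]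
    split_ifs <;> rfl

theorem pvStepB_snd_mono (c : Int → Int) (s : Int × Int) (x : Int) :
    s.2 ≤ (pvStepB c s x).2 := by
  unfold pvStepB; split_ifs with h
  · simp; omega
  · omega

theorem pvFoldB_snd_mono (c : Int → Int) (l : List Int) (s : Int × Int) :
    s.2 ≤ (l.foldl (pvStepB c) s).2 := by
  induction l generalizing s with
  | nil => simp
  | cons x t ih => exact le_trans (pvStepB_snd_mono c s x) (ih _)

-- once an update for x has been considered, the kept count is at least c x
theorem pvSeen_le (c : Int → Int) (seen : List Int) (s : Int × Int) (x : Int)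
    (hx : x ∈ seen) : c x ≤ (seen.foldl (pvStepB c) s).2 := by
  induction seen generalizing s with
  | nil => cases hx
  | cons y t ih =>
    rcases List.mem_cons.mp hx with rfl | hxt
    · refine le_trans ?_ (pvFoldB_snd_mono c t _)
      unfold pvStepB; split_ifs with hh
      · simp
      · omega
    · exact ih _ hxt

theorem pvStepB_of_le (c : Int → Int) (st : Int × Int) (x : Int)
    (h : c x ≤ st.2) : pvStepB c st x = st := by
  unfold pvStepB; rw [if_neg]; omega

-- folding B's step over the first-occurrence dedup (the Set built from `seen`) equals
-- folding it over the raw list: a repeated element never beats the strict max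
theorem pvFold_dedup (c : Int → Int) (l : List Int) (seen : List Int) (s : Int × Int) :
    (l.foldl PySem.Set.add seen).foldl (pvStepB c) s
      = l.foldl (pvStepB c) (seen.foldl (pvStepB c) s) := by
  induction l generalizing seen with
  | nil => simp
  | cons x t ih =>
    simp only [List.foldl_cons]
    rw [ih]
    by_cases h : PySem.Set.contains seen x = true
    · have hadd : PySem.Set.add seen x = seen := by
        unfold PySem.Set.add; rw [if_pos h]
      rw [hadd]
      congr 1
      have hmem : x ∈ seen := by simpa [PySem.Set.contains] using h
      exact (pvStepB_of_le c _ x (pvSeen_le c seen s x hmem)).symm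
    · have hadd : PySem.Set.add seen x = seen ++ [x] := by
        unfold PySem.Set.add; rw [if_neg h]
      rw [hadd, List.foldl_append]
      rfl

-- A's dictionary-building loop is exactly PySem.Dict.counter
theorem pvCounter_eq (numeros : List Int) :
    numeros.foldl (fun d num =>
        if d.contains num then d.modify num 0 (· + 1) else d.insert num 1)
        PySem.Dict.empty = PySem.Dict.counter numeros := by
  rw [PySem.Dict.counter]
  congr 1
  funext d num
  by_cases h : d.contains num = true
  · simp [h]
  · have hf : List.find? (fun p => p.1 == num) d.items = none := by
      rw [List.find?_eq_none]
      intro p hp hb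
      exact h (by simp only [PySem.Dict.contains, List.any_eq_true]; exact ⟨p, hp, hb⟩)
    simp [h, PySem.Dict.modify, PySem.Dict.getD, PySem.Dict.get?, hf]

-- ===== VERDICT (by name: the statement is the Claim_ definition above) =====
theorem moda_spec : Claim_equal_moda := by
  intro numeros _
  unfold Spec_moda
  cases numeros with
  | nil => rfl
  | cons h t =>
    simp only [moda, moda_alt]
    rw [if_neg (by simp : ¬ (h :: t).length = 0), pvCounter_eq]
    have hA : ((PySem.Dict.counter (h :: t)).keys.foldl
        (fun (st : Int × Int) num =>
          if PySem.Dict.getD (PySem.Dict.counter (h :: t)) num 0 > st.1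
          then (PySem.Dict.getD (PySem.Dict.counter (h :: t)) num 0, num) else st)
        (0, PySem.List.pyGetD (h :: t) 0 0))
        = (PySem.Dict.counter (h :: t)).keys.foldl
            (pvStepA (fun num => ((PySem.List.count (h :: t) num : Nat) : Int)))
            (0, PySem.List.pyGetD (h :: t) 0 0) := by
      apply List.foldl_ext
      intro a b _
      rw [pvStepA, PySem.Dict.getD_counter]
      rfl
    rw [hA, pvStepA_swap, PySem.Dict.keys_counter, PySem.Set.ofList, pvFold_dedup]
    have hinit : (Prod.swap (0, PySem.List.pyGetD (h :: t) 0 0) : Int × Int) = (h, 0) := by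
      simp [PySem.List.pyGetD_zero_cons]
    simp only [PySem.Set.empty, List.foldl_nil, hinit]
    rfl
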